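-- pv_equiv track=rewrite | github.com/czbiohub-sf/iohub | src/iohub/core/ozx.py | _bfs_order
-- ===== SOURCE A (Python) =====
-- from collections.abc import Callable, Iterable
--
-- def _bfs_order(names: Iterable[str]) -> list[str]:
--     """Order ``names`` for RFC-9 SHOULD compliance.
--
--     All ``zarr.json`` entries first, sorted by depth then name (root
--     sorts first because it sits at depth 0). Other entries keep their
--     input order.
--     """
--     meta: list[tuple[int, str]] = []
--     chunks: list[str] = []
--     for name in names:
--         if name.rsplit("/", 1)[-1] == "zarr.json":
--             meta.append((name.count("/"), name))
--         else:
--             chunks.append(name)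
--     meta.sort()
--     return [name for _, name in meta] + chunks
-- ===== SOURCE B (Python) =====
-- def _bfs_order(names):
--     """Depth-bucketed emission: group zarr.json entries by depth in a dict,
--     then emit each depth level in ascending order, names sorted within a level."""
--     levels = {}
--     chunks = []
--     for name in names:
--         if name.rsplit("/", 1)[-1] == "zarr.json":
--             levels.setdefault(name.count("/"), []).append(name)
--         else:
--             chunks.append(name)
--     out = []
--     for depth in sorted(levels):
--         out.extend(sorted(levels[depth]))
--     out += chunks
--     return out
-- ===== Notes on version B (the rewrite author's own statement) =====
-- stated objective: alternative
-- what changed: Replaces the single combined sort of (depth, name) tuples with a depth-bucketed dict built in the partition pass, emitting levels in ascending depth with names sorted within each level (chunks unchanged).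
import Mathlib
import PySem

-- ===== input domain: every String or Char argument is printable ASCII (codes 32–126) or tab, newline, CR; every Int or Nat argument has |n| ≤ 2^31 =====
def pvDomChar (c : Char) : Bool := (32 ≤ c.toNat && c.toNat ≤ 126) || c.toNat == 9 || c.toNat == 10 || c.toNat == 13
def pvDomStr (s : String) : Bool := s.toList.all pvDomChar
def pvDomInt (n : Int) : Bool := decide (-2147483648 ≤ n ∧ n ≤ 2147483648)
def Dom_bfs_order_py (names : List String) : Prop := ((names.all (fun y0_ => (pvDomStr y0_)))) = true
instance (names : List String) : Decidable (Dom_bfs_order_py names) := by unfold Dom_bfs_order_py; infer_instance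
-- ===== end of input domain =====

-- B replaces A's single sort of (depth, name) tuples by a depth-bucketed dict emitted level by level (alternative decomposition, same cost).

-- ===== PORT A =====
-- hand port of s.rsplit("/", 1)[-1]: the suffix after the LAST '/' (the whole string if none); exact on all strings
def pvLastSeg (s : String) : String := String.ofList ((s.toList.reverse.takeWhile (fun c => c ≠ '/')).reverse)

def bfs_order_py (names : List String) : List String :=
  let st := names.foldl
    (fun (acc : List (Int × String) × List String) name =>
      if pvLastSeg name = "zarr.json" then
        (acc.1 ++ [((PySem.Str.count name "/" : Int), name)], acc.2)
      else
        (acc.1, acc.2 ++ [name]))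
    ([], [])
  (PySem.List.sorted2 st.1 (fun p => p.1) (fun p => p.2)).map (fun p => p.2) ++ st.2

-- ===== PORT B =====
def bfs_order_py_alt (names : List String) : List String :=
  let st := names.foldl
    (fun (acc : PySem.Dict Int (List String) × List String) name =>
      if pvLastSeg name = "zarr.json" then
        (acc.1.modify ((PySem.Str.count name "/" : Int)) [] (fun g => g ++ [name]), acc.2)
      else
        (acc.1, acc.2 ++ [name]))
    (PySem.Dict.empty, [])
  let out := (PySem.List.sorted st.1.keys (fun k => k)).foldl
    (fun out d => out ++ PySem.List.sorted (st.1.getD d []) (fun n => n)) []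
  out ++ st.2

-- ===== PRECONDITION & SPEC =====
def Spec_bfs_order_py (names : List String) (out : List String) : Prop := out = bfs_order_py_alt names
instance (names : List String) (out : List String) : Decidable (Spec_bfs_order_py names out) := by unfold Spec_bfs_order_py; infer_instance

-- ===== CLAIM (what is proved, stated in full; the proofs are below) =====
def Claim_equal_bfs_order_py : Prop := ∀ (names : List String), Dom_bfs_order_py names → Spec_bfs_order_py names (bfs_order_py names)

-- ===== LEMMAS AND PROOFS =====
def pvCnt (n : String) : Int := (PySem.Str.count n "/" : Int)
def pvPair (n : String) : Int × String := (pvCnt n, n)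

-- A's partition loop, split into the two accumulators
lemma a_fold (names : List String) :
    names.foldl
      (fun (acc : List (Int × String) × List String) name =>
        if pvLastSeg name = "zarr.json" then
          (acc.1 ++ [((PySem.Str.count name "/" : Int), name)], acc.2)
        else
          (acc.1, acc.2 ++ [name]))
      ([], [])
    = ((names.filter (fun n => decide (pvLastSeg n = "zarr.json"))).map pvPair,
       names.filter (fun n => !decide (pvLastSeg n = "zarr.json"))) := by
  have h : (fun (acc : List (Int × String) × List String) name =>
      if pvLastSeg name = "zarr.json" then
        (acc.1 ++ [((PySem.Str.count name "/" : Int), name)], acc.2)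
      else
        (acc.1, acc.2 ++ [name]))
    = (fun acc name =>
        ((if pvLastSeg name = "zarr.json" then acc.1 ++ [pvPair name] else acc.1),
         (if ¬ pvLastSeg name = "zarr.json" then acc.2 ++ [name] else acc.2))) := by
    funext acc name
    by_cases hm : pvLastSeg name = "zarr.json"
    · simp [hm, pvPair, pvCnt]
    · simp [hm]
  rw [h, PySem.List.foldl_prod_mk
    (f := fun (l : List (Int × String)) n => if pvLastSeg n = "zarr.json" then l ++ [pvPair n] else l)
    (g := fun (l : List String) n => if ¬ pvLastSeg n = "zarr.json" then l ++ [n] else l)]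
  rw [PySem.List.foldl_append_ite, PySem.List.foldl_append_ite_eq_filter]
  simp

-- B's partition loop, split into the two accumulators
lemma b_fold (names : List String) :
    names.foldl
      (fun (acc : PySem.Dict Int (List String) × List String) name =>
        if pvLastSeg name = "zarr.json" then
          (acc.1.modify ((PySem.Str.count name "/" : Int)) [] (fun g => g ++ [name]), acc.2)
        else
          (acc.1, acc.2 ++ [name]))
      (PySem.Dict.empty, [])
    = ((names.filter (fun n => decide (pvLastSeg n = "zarr.json"))).foldl
         (fun d n => d.modify (pvCnt n) [] (fun g => g ++ [n])) PySem.Dict.empty,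
       names.filter (fun n => !decide (pvLastSeg n = "zarr.json"))) := by
  have h : (fun (acc : PySem.Dict Int (List String) × List String) name =>
      if pvLastSeg name = "zarr.json" then
        (acc.1.modify ((PySem.Str.count name "/" : Int)) [] (fun g => g ++ [name]), acc.2)
      else
        (acc.1, acc.2 ++ [name]))
    = (fun acc name =>
        ((if pvLastSeg name = "zarr.json" then acc.1.modify (pvCnt name) [] (fun g => g ++ [name]) else acc.1),
         (if ¬ pvLastSeg name = "zarr.json" then acc.2 ++ [name] else acc.2))) := by
    funext acc name
    by_cases hm : pvLastSeg name = "zarr.json"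
    · simp [hm, pvCnt]
    · simp [hm]
  rw [h, PySem.List.foldl_prod_mk
    (f := fun (d : PySem.Dict Int (List String)) n =>
      if pvLastSeg n = "zarr.json" then d.modify (pvCnt n) [] (fun g => g ++ [n]) else d)
    (g := fun (l : List String) n => if ¬ pvLastSeg n = "zarr.json" then l ++ [n] else l)]
  rw [PySem.List.foldl_ite_eq_foldl_filter, PySem.List.foldl_append_ite_eq_filter]
  simp

-- B's dict: keys and per-depth groups
lemma b_keys (xs : List String) :
    (xs.foldl (fun d n => d.modify (pvCnt n) [] (fun g => g ++ [n])) PySem.Dict.empty).keys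
    = PySem.Set.ofList (xs.map pvCnt) := by
  rw [PySem.Dict.keys_foldl_modify_key]
  rfl

lemma b_getD (xs : List String) (c : Int) :
    (xs.foldl (fun d n => d.modify (pvCnt n) [] (fun g => g ++ [n])) PySem.Dict.empty).getD c []
    = xs.filter (fun n => pvCnt n == c) := by
  have h : xs.foldl (fun d n => d.modify (pvCnt n) [] (fun g => g ++ [n])) PySem.Dict.empty
      = (xs.map pvPair).foldl (fun d p => d.modify p.1 [] (fun g => g ++ [p.2])) PySem.Dict.empty := by
    rw [List.foldl_map]
    rfl
  rw [h, PySem.Dict.getD_foldl_modify_append, List.filter_map]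
  simp [List.map_map, Function.comp_def, pvPair]

-- sorted2 with tuple key (fst, snd) IS sorted with the lexicographic key toLex
lemma sorted2_eq_sorted_toLex (xs : List (Int × String)) :
    PySem.List.sorted2 xs (fun p => p.1) (fun p => p.2)
    = PySem.List.sorted xs (fun p => (toLex p : Int ×ₗ String)) := by
  rw [PySem.List.sorted_eq_foldl_insertBy]
  simp only [PySem.List.sorted2]
  have hb : (fun (a b : Int × String) => decide (a.1 < b.1) || (!decide (b.1 < a.1) && decide (a.2 < b.2)))
      = (fun (a b : Int × String) => decide ((toLex a : Int ×ₗ String) < toLex b)) := by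
    funext a b
    apply Bool.eq_iff_iff.mpr
    simp only [Bool.or_eq_true, Bool.and_eq_true, Bool.not_eq_true',
      decide_eq_true_iff, decide_eq_false_iff_not, Prod.Lex.lt_iff, ofLex_toLex]
    constructor
    · rintro (h1 | ⟨h1, h2⟩)
      · exact Or.inl h1
      · rcases lt_trichotomy a.1 b.1 with h | h | h
        · exact Or.inl h
        · exact Or.inr ⟨h, h2⟩
        · exact absurd h h1
    · rintro (h1 | ⟨h1, h2⟩)
      · exact Or.inl h1
      · exact Or.inr ⟨by rw [h1]; exact lt_irrefl _, h2⟩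
  exact congrArg (fun f => xs.foldl (fun acc x => PySem.List.insertBy f x acc) []) hb

lemma flatMap_congr_mem (ks : List Int) (f g : Int → List String)
    (h : ∀ k ∈ ks, f k = g k) : ks.flatMap f = ks.flatMap g := by
  induction ks with
  | nil => rfl
  | cons k ks ih =>
    rw [List.flatMap_cons, List.flatMap_cons, h k (List.mem_cons_self),
      ih (fun k' hk' => h k' (List.mem_cons_of_mem _ hk'))]

lemma flatMap_perm_congr (ks : List Int) (f g : Int → List String)
    (h : ∀ k ∈ ks, (f k).Perm (g k)) :
    (ks.flatMap f).Perm (ks.flatMap g) := by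
  induction ks with
  | nil => exact List.Perm.refl _
  | cons k ks ih =>
    rw [List.flatMap_cons, List.flatMap_cons]
    exact (h k (List.mem_cons_self)).append (ih (fun k' hk' => h k' (List.mem_cons_of_mem _ hk')))

-- a flatMap of per-key filters over distinct covering keys is a permutation of the list
lemma flatMap_filter_perm (g : String → Int) (ks : List Int) (l : List String)
    (hnd : ks.Nodup) (hcov : ∀ x ∈ l, g x ∈ ks) :
    (ks.flatMap (fun k => l.filter (fun x => g x == k))).Perm l := by
  induction ks generalizing l with
  | nil =>
    cases l with
    | nil => simp
    | cons x t => exact absurd (hcov x (List.mem_cons_self)) (List.not_mem_nil)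
  | cons k ks ih =>
    rw [List.flatMap_cons]
    have hnd' := (List.nodup_cons.mp hnd)
    have hcong : ks.flatMap (fun k' => l.filter (fun x => g x == k'))
        = ks.flatMap (fun k' => (l.filter (fun x => !(g x == k))).filter (fun x => g x == k')) := by
      apply flatMap_congr_mem
      intro k' hk'
      rw [List.filter_filter]
      apply List.filter_congr
      intro x _
      by_cases hgx : g x == k'
      · have : ¬ (g x == k) = true := by
          simp only [beq_iff_eq] at hgx ⊢
          rw [hgx]
          intro hkk; exact hnd'.1 (hkk ▸ hk')
        simp [hgx, this]
      · simp [hgx]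
    rw [hcong]
    have hperm := ih (l.filter (fun x => !(g x == k))) hnd'.2
      (by
        intro x hx
        have hmem := List.mem_filter.mp hx
        have := hcov x hmem.1
        rcases List.mem_cons.mp this with h | h
        · simp [h] at hmem
        · exact h)
    exact (hperm.append_left (l.filter (fun x => g x == k))).trans (List.filter_append_perm _ l)

-- level-by-level emission is pairwise nondecreasing in the lexicographic (depth, name) key
lemma pairwise_flat (xs : List String) (ks : List Int) (hk : ks.Pairwise (· < ·)) :
    (ks.flatMap (fun k => PySem.List.sorted (xs.filter (fun n => pvCnt n == k)) (fun n => n))).Pairwise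
      (fun a b => (toLex (pvPair a) : Int ×ₗ String) ≤ toLex (pvPair b)) := by
  induction ks with
  | nil => exact List.Pairwise.nil
  | cons k ks ih =>
    have hk' := List.pairwise_cons.mp hk
    rw [List.flatMap_cons]
    rw [List.pairwise_append]
    refine ⟨?_, ih hk'.2, ?_⟩
    · have hp := PySem.List.sorted_pairwise (xs.filter (fun n => pvCnt n == k)) (fun n => n)
      refine List.Pairwise.imp_of_mem ?_ hp
      intro a b ha hb hle
      have ha' := List.mem_filter.mp ((PySem.List.mem_sorted _ _ _ _).mp ha)
      have hb' := List.mem_filter.mp ((PySem.List.mem_sorted _ _ _ _).mp hb)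
      rw [Prod.Lex.le_iff]
      right
      refine ⟨?_, hle⟩
      show pvCnt a = pvCnt b
      rw [beq_iff_eq] at ha' hb'
      rw [ha'.2, hb'.2]
    · intro a ha b hb
      have ha' := List.mem_filter.mp ((PySem.List.mem_sorted _ _ _ _).mp ha)
      obtain ⟨k', hk'mem, hb2⟩ := List.mem_flatMap.mp hb
      have hb' := List.mem_filter.mp ((PySem.List.mem_sorted _ _ _ _).mp hb2)
      rw [Prod.Lex.le_iff]
      left
      show pvCnt a < pvCnt b
      rw [beq_iff_eq] at ha' hb'
      rw [ha'.2, hb'.2]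
      exact hk'.1 k' hk'mem

-- the central identity: A's sorted tuple list, projected to names, equals B's level emission
lemma central (xs : List String) :
    (PySem.List.sorted2 (xs.map pvPair) (fun p => p.1) (fun p => p.2)).map (fun p => p.2)
    = (PySem.List.sorted (PySem.Set.ofList (xs.map pvCnt)) (fun k => k)).flatMap
        (fun k => PySem.List.sorted (xs.filter (fun n => pvCnt n == k)) (fun n => n)) := by
  have hKnd : (PySem.List.sorted (PySem.Set.ofList (xs.map pvCnt)) (fun k => k)).Nodup :=
    (PySem.List.sorted_perm _ _ _).symm.nodup (PySem.Set.nodup_ofList _)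
  have hKcov : ∀ x ∈ xs, pvCnt x ∈ PySem.List.sorted (PySem.Set.ofList (xs.map pvCnt)) (fun k => k) := by
    intro x hx
    rw [PySem.List.mem_sorted, PySem.Set.mem_ofList]
    exact List.mem_map_of_mem hx
  have hRperm : ((PySem.List.sorted (PySem.Set.ofList (xs.map pvCnt)) (fun k => k)).flatMap
      (fun k => PySem.List.sorted (xs.filter (fun n => pvCnt n == k)) (fun n => n))).Perm xs := by
    refine (flatMap_perm_congr _ _ (fun k => xs.filter (fun n => pvCnt n == k)) ?_).trans
      (flatMap_filter_perm pvCnt _ xs hKnd hKcov)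
    intro k _
    exact PySem.List.sorted_perm _ _ _
  have h : PySem.List.sorted (xs.map pvPair) (fun p => (toLex p : Int ×ₗ String))
      = ((PySem.List.sorted (PySem.Set.ofList (xs.map pvCnt)) (fun k => k)).flatMap
          (fun k => PySem.List.sorted (xs.filter (fun n => pvCnt n == k)) (fun n => n))).map pvPair := by
    apply PySem.List.eq_of_perm_of_pairwise_le_of_injective
      (key := fun p : Int × String => (toLex p : Int ×ₗ String))
    · intro a b hab
      exact toLex.injective hab
    · exact (PySem.List.sorted_perm _ _ _).trans (hRperm.map pvPair).symm
    · exact PySem.List.sorted_pairwise _ _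
    · rw [List.pairwise_map]
      exact pairwise_flat xs _ (PySem.List.sorted_ofList_pairwise_lt _)
  rw [sorted2_eq_sorted_toLex, h, List.map_map]
  simp [Function.comp_def, pvPair]

-- ===== VERDICT (by name: the statement is the Claim_ definition above) =====
theorem bfs_order_py_spec : Claim_equal_bfs_order_py := by
  intro names _
  show bfs_order_py names = bfs_order_py_alt names
  unfold bfs_order_py bfs_order_py_alt
  rw [a_fold, b_fold]
  simp only [b_keys, b_getD, PySem.List.foldl_append_eq_flatMap, List.nil_append]
  rw [central]
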